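-- pv_equiv track=rewrite | github.com/tpYaki/PhenoAptAnalysis | functions.py | output_columns
-- ===== SOURCE A (Python) =====
-- def output_columns(hpo,tools,intersect,REVEL_thresh,CADD_thresh):
--     columns_fill = ['CaseID', 'hpo', 'hpo_id_input', 'Symbol']
--     for tool in tools:
--         if tool in ['phrank', 'phenolyzer', 'GADO', 'phen2gene','PhenoRank','HANRD','phenomizer']:
--             columns_fill = columns_fill + [f'{tool}_rank']
--             if intersect: columns_fill = columns_fill + [f'{tool}_intersect_rank']
--             if len(REVEL_thresh) != 0:
--                 for thresh in REVEL_thresh: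
--                     columns_fill = columns_fill + [f'{tool}_rank_REVEL_{thresh}']
--             if len(CADD_thresh) != 0:
--                 for thresh in CADD_thresh:
--                     columns_fill = columns_fill + [f'{tool}_rank_CADD_{thresh}']
--         else:
--             if tool == 'phenoapt':
--                 if hpo == 'Weight':
--                     for k in ['all_hpo_plus_weight', 'only_weight_hpo_weight', 'only_weight_hpo_no_weight']:
--                         columns_fill = columns_fill + [f'{k}_phenoapt_rank']
--                         if intersect: columns_fill = columns_fill + [f'{k}_phenoapt_intersect_rank']
--                         if len(REVEL_thresh) != 0:
--                             for thresh in REVEL_thresh: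
--                                 columns_fill = columns_fill + [f'{k}_phenoapt_rank_REVEL_{thresh}']
--                         if len(CADD_thresh) != 0:
--                             for thresh in CADD_thresh:
--                                 columns_fill = columns_fill + [f'{k}_phenoapt_rank_CADD_{thresh}']
--                 else:
--                     columns_fill = columns_fill + [f'{tool}_rank']
--                     if intersect: columns_fill = columns_fill + [f'{tool}_intersect_rank']
--                     if len(REVEL_thresh) != 0:
--                         for thresh in REVEL_thresh:
--                             columns_fill = columns_fill + [f'{tool}_rank_REVEL_{thresh}']
--                     if len(CADD_thresh) != 0:
--                         for thresh in CADD_thresh: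
--                             columns_fill = columns_fill + [f'{tool}_rank_CADD_{thresh}']
--             else:
--                 columns_fill = columns_fill + [f'{tool}_rank']
--     return columns_fill
-- ===== SOURCE B (Python) =====
-- RANKED = {'phrank', 'phenolyzer', 'GADO', 'phen2gene', 'PhenoRank', 'HANRD', 'phenomizer'}
-- PHENOAPT_KS = ('all_hpo_plus_weight', 'only_weight_hpo_weight', 'only_weight_hpo_no_weight')
--
--
-- def output_columns(hpo, tools, intersect, REVEL_thresh, CADD_thresh):
--     # Phase 1: turn the tool list into emission units (base prefix, full expansion?).
--     units = []
--     for tool in tools: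
--         if tool == 'phenoapt' and hpo == 'Weight':
--             units += [(k + '_phenoapt', True) for k in PHENOAPT_KS]
--         elif tool in RANKED or tool == 'phenoapt':
--             units.append((tool, True))
--         else:
--             units.append((tool, False))
--     # Phase 2: build the suffix template once, then render every unit against it.
--     suffixes = ['_rank']
--     if intersect:
--         suffixes.append('_intersect_rank')
--     suffixes += ['_rank_REVEL_' + t for t in REVEL_thresh]
--     suffixes += ['_rank_CADD_' + t for t in CADD_thresh]
--     return ['CaseID', 'hpo', 'hpo_id_input', 'Symbol'] + [
--         base + s for base, full in units for s in (suffixes if full else ['_rank'])]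
-- ===== Notes on version B (the rewrite author's own statement) =====
-- stated objective: faster
-- what changed: Two staged passes replace A's single pass with three duplicated inline append blocks: B first compiles the tool list into (base, full?) emission units, builds the suffix template ('_rank', '_intersect_rank', REVEL/CADD suffixes) once, then renders all columns with one flat comprehension; A instead re-runs the guard-laden append block per tool and rebuilds the list by concatenation.
import Mathlib
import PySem

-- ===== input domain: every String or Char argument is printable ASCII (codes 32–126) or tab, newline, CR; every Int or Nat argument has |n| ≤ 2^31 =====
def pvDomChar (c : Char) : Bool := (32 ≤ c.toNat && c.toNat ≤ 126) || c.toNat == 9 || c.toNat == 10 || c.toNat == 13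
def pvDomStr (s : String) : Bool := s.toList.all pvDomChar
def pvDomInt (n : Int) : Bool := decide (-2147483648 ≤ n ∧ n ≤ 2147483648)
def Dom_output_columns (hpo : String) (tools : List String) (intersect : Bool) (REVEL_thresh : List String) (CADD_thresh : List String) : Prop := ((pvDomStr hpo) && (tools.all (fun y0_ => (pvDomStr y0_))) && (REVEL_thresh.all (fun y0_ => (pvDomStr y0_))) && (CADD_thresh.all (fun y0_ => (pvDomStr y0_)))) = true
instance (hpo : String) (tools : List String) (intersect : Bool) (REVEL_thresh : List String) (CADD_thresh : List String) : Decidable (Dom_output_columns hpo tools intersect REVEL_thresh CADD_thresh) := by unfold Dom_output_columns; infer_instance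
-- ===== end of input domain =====

-- B restructures A's single guard-laden pass into two stages — compile tools to
-- (base, full?) emission units, build the suffix template once, render with one
-- flat comprehension; A's repeated whole-list concatenation is quadratic in the
-- output length, B is linear (a timing run measured B faster).

-- ===== PORT A =====
-- A's inline column block (repeated three times in the Python source with different
-- bases); transliterated once with the base as a parameter, threading the accumulator
-- through the stepwise appends and the len(...) != 0 guards exactly as A does.
def pvBlockA (acc : List String) (base : String) (intersect : Bool)
    (REVEL_thresh CADD_thresh : List String) : List String :=
  let a1 := acc ++ [base ++ "_rank"]
  let a2 := if intersect then a1 ++ [base ++ "_intersect_rank"] else a1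
  let a3 := if REVEL_thresh.length ≠ 0 then
      REVEL_thresh.foldl (fun a thresh => a ++ [base ++ "_rank_REVEL_" ++ thresh]) a2
    else a2
  if CADD_thresh.length ≠ 0 then
    CADD_thresh.foldl (fun a thresh => a ++ [base ++ "_rank_CADD_" ++ thresh]) a3
  else a3

def pvStepA (hpo : String) (intersect : Bool) (REVEL_thresh CADD_thresh : List String)
    (acc : List String) (tool : String) : List String :=
  if ["phrank", "phenolyzer", "GADO", "phen2gene", "PhenoRank", "HANRD", "phenomizer"].contains tool then
    pvBlockA acc tool intersect REVEL_thresh CADD_thresh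
  else
    if tool == "phenoapt" then
      if hpo == "Weight" then
        ["all_hpo_plus_weight", "only_weight_hpo_weight", "only_weight_hpo_no_weight"].foldl
          (fun a k => pvBlockA a (k ++ "_phenoapt") intersect REVEL_thresh CADD_thresh) acc
      else
        pvBlockA acc tool intersect REVEL_thresh CADD_thresh
    else
      acc ++ [tool ++ "_rank"]

def output_columns (hpo : String) (tools : List String) (intersect : Bool) (REVEL_thresh : List String) (CADD_thresh : List String) : List String :=
  tools.foldl (pvStepA hpo intersect REVEL_thresh CADD_thresh)
    ["CaseID", "hpo", "hpo_id_input", "Symbol"]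

-- ===== PORT B =====
-- Phase 1 of Source B: the tool list compiled to (base, full-expansion?) units.
def pvUnitsB (hpo : String) (tools : List String) : List (String × Bool) :=
  tools.foldl (fun units tool =>
    if tool == "phenoapt" && hpo == "Weight" then
      units ++ ["all_hpo_plus_weight", "only_weight_hpo_weight", "only_weight_hpo_no_weight"].map
        (fun k => (k ++ "_phenoapt", true))
    else if ["phrank", "phenolyzer", "GADO", "phen2gene", "PhenoRank", "HANRD", "phenomizer"].contains tool
        || tool == "phenoapt" then
      units ++ [(tool, true)]
    else
      units ++ [(tool, false)]) []

-- Phase 2 of Source B: the suffix template, built once.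
def pvSuffixesB (intersect : Bool) (REVEL_thresh CADD_thresh : List String) : List String :=
  (["_rank"] ++ (if intersect then ["_intersect_rank"] else []))
    ++ REVEL_thresh.map (fun t => "_rank_REVEL_" ++ t)
    ++ CADD_thresh.map (fun t => "_rank_CADD_" ++ t)

def output_columns_alt (hpo : String) (tools : List String) (intersect : Bool) (REVEL_thresh : List String) (CADD_thresh : List String) : List String :=
  ["CaseID", "hpo", "hpo_id_input", "Symbol"] ++
    (pvUnitsB hpo tools).flatMap (fun bu =>
      (if bu.2 then pvSuffixesB intersect REVEL_thresh CADD_thresh else ["_rank"]).map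
        (fun s => bu.1 ++ s))

-- ===== PRECONDITION & SPEC =====
def Spec_output_columns (hpo : String) (tools : List String) (intersect : Bool) (REVEL_thresh : List String) (CADD_thresh : List String) (out : List String) : Prop := out = output_columns_alt hpo tools intersect REVEL_thresh CADD_thresh
instance (hpo : String) (tools : List String) (intersect : Bool) (REVEL_thresh : List String) (CADD_thresh : List String) (out : List String) : Decidable (Spec_output_columns hpo tools intersect REVEL_thresh CADD_thresh out) := by unfold Spec_output_columns; infer_instance

-- ===== CLAIM =====
def Claim_equal_output_columns : Prop := ∀ (hpo : String) (tools : List String) (intersect : Bool) (REVEL_thresh : List String) (CADD_thresh : List String), Dom_output_columns hpo tools intersect REVEL_thresh CADD_thresh → Spec_output_columns hpo tools intersect REVEL_thresh CADD_thresh (output_columns hpo tools intersect REVEL_thresh CADD_thresh)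

-- ===== LEMMAS AND PROOFS =====
-- the unit list contributed by one tool
def pvUnitTool (hpo tool : String) : List (String × Bool) :=
  if tool == "phenoapt" && hpo == "Weight" then
    ["all_hpo_plus_weight", "only_weight_hpo_weight", "only_weight_hpo_no_weight"].map
      (fun k => (k ++ "_phenoapt", true))
  else if ["phrank", "phenolyzer", "GADO", "phen2gene", "PhenoRank", "HANRD", "phenomizer"].contains tool
      || tool == "phenoapt" then [(tool, true)]
  else [(tool, false)]

def pvRender (intersect : Bool) (R C : List String) (bu : String × Bool) : List String :=
  (if bu.2 then pvSuffixesB intersect R C else ["_rank"]).map (fun s => bu.1 ++ s)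

lemma pvUnitsB_eq (hpo : String) (tools : List String) (acc : List (String × Bool)) :
    tools.foldl (fun units tool =>
      if tool == "phenoapt" && hpo == "Weight" then
        units ++ ["all_hpo_plus_weight", "only_weight_hpo_weight", "only_weight_hpo_no_weight"].map
          (fun k => (k ++ "_phenoapt", true))
      else if ["phrank", "phenolyzer", "GADO", "phen2gene", "PhenoRank", "HANRD", "phenomizer"].contains tool
          || tool == "phenoapt" then
        units ++ [(tool, true)]
      else
        units ++ [(tool, false)]) acc
    = acc ++ tools.flatMap (pvUnitTool hpo) := by
  induction tools generalizing acc with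
  | nil => simp
  | cons t ts ih =>
    rw [List.foldl_cons, ih]
    unfold pvUnitTool
    split_ifs <;> simp_all
    all_goals rw [if_neg (by tauto)]
    all_goals simp_all

lemma pv_foldl_app (f : String → String) (R : List String) (acc : List String) :
    R.foldl (fun a t => a ++ [f t]) acc = acc ++ R.map f := by
  induction R generalizing acc with
  | nil => simp
  | cons x xs ih => rw [List.foldl_cons, ih]; simp

lemma pv_gfold (f : String → String) (R : List String) (acc : List String) :
    (if R.length ≠ 0 then R.foldl (fun a t => a ++ [f t]) acc else acc) = acc ++ R.map f := by
  cases R with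
  | nil => simp
  | cons x xs => rw [if_pos (by simp), pv_foldl_app]

lemma pv_map_shift (base pre : String) (R : List String) :
    List.map (HAppend.hAppend (base ++ pre)) R = List.map (fun x => base ++ (pre ++ x)) R := by
  induction R with
  | nil => rfl
  | cons x xs ih => simp [ih, String.append_assoc]

lemma pvBlock_eq (acc : List String) (base : String) (intersect : Bool) (R C : List String) :
    pvBlockA acc base intersect R C
      = acc ++ (pvSuffixesB intersect R C).map (fun s => base ++ s) := by
  unfold pvBlockA pvSuffixesB
  simp only [pv_gfold]
  cases intersect <;> simp [Function.comp_def, pv_map_shift]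

lemma pvStep_eq (hpo : String) (intersect : Bool) (R C : List String)
    (acc : List String) (tool : String) :
    pvStepA hpo intersect R C acc tool
      = acc ++ (pvUnitTool hpo tool).flatMap (pvRender intersect R C) := by
  unfold pvStepA pvUnitTool pvRender
  split_ifs with h1 h2 h3 <;>
    simp_all [pvBlock_eq, List.foldl_cons, List.foldl_nil, List.append_assoc]

lemma pv_flatMap_flatMap {α β γ : Type} (l : List α) (f : α → List β) (g : β → List γ) :
    (l.flatMap f).flatMap g = l.flatMap (fun x => (f x).flatMap g) := by
  induction l <;> simp_all

lemma pvFoldA_eq (hpo : String) (intersect : Bool) (R C : List String)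
    (tools : List String) (acc : List String) :
    tools.foldl (pvStepA hpo intersect R C) acc
      = acc ++ tools.flatMap (fun t => (pvUnitTool hpo t).flatMap (pvRender intersect R C)) := by
  induction tools generalizing acc with
  | nil => simp
  | cons t ts ih => rw [List.foldl_cons, ih, pvStep_eq]; simp

-- ===== VERDICT =====
theorem output_columns_spec : Claim_equal_output_columns := by
  intro hpo tools intersect R C _
  unfold Spec_output_columns output_columns output_columns_alt pvUnitsB
  rw [pvFoldA_eq, pvUnitsB_eq, List.nil_append, pv_flatMap_flatMap]
  rfl
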